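-- pv_equiv track=rewrite | github.com/mastermercury18/uchicago-python-solutions | basics/solutions/num_divisible.py | num_divisible
-- ===== SOURCE A (Python) =====
-- def num_divisible(lb, ub, p, q):
--     """
--     How many numbers between lb and ub (inclusive) are divisible by p
--     or divisible by q, but not divisible by both p and q.
--     """
--
--     ### YOUR CODE GOES HERE
--     # Replace the following line with your code.
--     # After running your code, variable n should contain the value
--     # we ask you to compute in this exercise.
--     n = 0
--     for num in range(lb, ub+1):
--         if not (num % p == 0 and num % q == 0):
--             if num % p == 0:
--                 n += 1
--             elif num % q == 0:
--                 n += 1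
--     ### DO NOT MODIFY THE FOLLOWING LINE!
--     return n
-- ===== SOURCE B (Python) =====
-- def num_divisible(lb, ub, p, q):
--     """O(1) arithmetic counting: multiples of d in [lb, ub] = ub//d - (lb-1)//d;
--     inclusion-exclusion with the lcm counts 'p or q but not both'."""
--     if lb > ub:
--         return 0
--
--     def gcd(a, b):
--         while b:
--             a, b = b, a % b
--         return a
--
--     def count(d):
--         d = abs(d)
--         return ub // d - (lb - 1) // d
--
--     l = abs(p) * abs(q) // gcd(abs(p), abs(q))
--     return count(p) + count(q) - 2 * count(l)
-- ===== Notes on version B (the rewrite author's own statement) =====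
-- stated objective: faster
-- what changed: Replaced the per-number loop over range(lb, ub+1) by O(1) arithmetic: multiples of d in [lb,ub] counted as ub//d - (lb-1)//d, combined by inclusion-exclusion with the lcm (count(p) + count(q) - 2*count(lcm)); Pre_ excludes only inputs where A raises ZeroDivisionError (zero divisor with nonempty range), where B raises too.
import Mathlib
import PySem

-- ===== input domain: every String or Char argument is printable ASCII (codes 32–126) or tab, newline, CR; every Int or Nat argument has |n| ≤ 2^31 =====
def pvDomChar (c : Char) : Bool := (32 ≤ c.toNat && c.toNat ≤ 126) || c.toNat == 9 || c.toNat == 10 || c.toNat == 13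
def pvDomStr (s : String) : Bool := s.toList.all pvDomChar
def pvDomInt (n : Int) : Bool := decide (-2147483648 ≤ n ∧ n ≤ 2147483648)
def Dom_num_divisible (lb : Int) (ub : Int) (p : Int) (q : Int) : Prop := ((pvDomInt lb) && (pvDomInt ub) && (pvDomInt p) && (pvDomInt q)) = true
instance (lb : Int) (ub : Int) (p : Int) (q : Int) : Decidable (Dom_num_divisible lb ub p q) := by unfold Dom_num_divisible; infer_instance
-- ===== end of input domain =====

-- B replaces A's per-number scan by floor-division counting with inclusion-exclusion over the lcm (measured asymptotically faster).

-- ===== PORT A =====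
-- A's loop body over the range, kept as the same fold over the same state n
def loopA (p q : Int) (xs : List Int) : Int :=
  xs.foldl (fun n num =>
    if ¬ (PySem.Int.mod num p = 0 ∧ PySem.Int.mod num q = 0) then
      if PySem.Int.mod num p = 0 then n + 1
      else if PySem.Int.mod num q = 0 then n + 1
      else n
    else n) 0

def num_divisible (lb : Int) (ub : Int) (p : Int) (q : Int) : Int :=
  loopA p q (PySem.List.pyRange lb (ub + 1) 1)

-- ===== PORT B =====
-- Source B's gcd loop runs on the (nonnegative) absolute values, so it is ported as recursion on Nat
def pyGcd (a b : Nat) : Nat :=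
  if h : b = 0 then a else pyGcd b (a % b)
termination_by b
decreasing_by exact Nat.mod_lt _ (Nat.pos_of_ne_zero h)

def num_divisible_alt (lb : Int) (ub : Int) (p : Int) (q : Int) : Int :=
  if lb > ub then 0
  else
    let count : Int → Int := fun d =>
      let d' : Int := (d.natAbs : Int)
      PySem.Int.floordiv ub d' - PySem.Int.floordiv (lb - 1) d'
    let l : Int := PySem.Int.floordiv ((p.natAbs : Int) * (q.natAbs : Int))
                     ((pyGcd p.natAbs q.natAbs : Nat) : Int)
    count p + count q - 2 * count l

-- ===== PRECONDITION & SPEC =====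
-- Pre_ excludes exactly the inputs where A raises ZeroDivisionError: a zero divisor with a nonempty range.
def Pre_num_divisible (lb : Int) (ub : Int) (p : Int) (q : Int) : Prop :=
  lb ≤ ub → (p ≠ 0 ∧ q ≠ 0)
instance (lb : Int) (ub : Int) (p : Int) (q : Int) : Decidable (Pre_num_divisible lb ub p q) := by
  unfold Pre_num_divisible; infer_instance

def pvWitness_num_divisible : Int × Int × Int × Int := (1, 20, 3, 5)

def Spec_num_divisible (lb : Int) (ub : Int) (p : Int) (q : Int) (out : Int) : Prop := out = num_divisible_alt lb ub p q
instance (lb : Int) (ub : Int) (p : Int) (q : Int) (out : Int) : Decidable (Spec_num_divisible lb ub p q out) := by unfold Spec_num_divisible; infer_instance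

-- ===== CLAIM (what is proved, stated in full; the proofs are below) =====
def Claim_equal_num_divisible : Prop := ∀ (lb : Int) (ub : Int) (p : Int) (q : Int), Dom_num_divisible lb ub p q → Pre_num_divisible lb ub p q → Spec_num_divisible lb ub p q (num_divisible lb ub p q)

-- ===== LEMMAS AND PROOFS =====

theorem pyGcd_eq (a b : Nat) : pyGcd a b = Nat.gcd b a := by
  induction b using Nat.strong_induction_on generalizing a with
  | _ b ih =>
    rw [pyGcd]
    split
    · rename_i h; subst h; simp
    · rename_i h
      rw [ih _ (Nat.mod_lt _ (Nat.pos_of_ne_zero h)), ← Nat.gcd_rec]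

-- the per-element increment of A's loop, as a standalone function
def incA (p q num : Int) : Int :=
  if ¬ (PySem.Int.mod num p = 0 ∧ PySem.Int.mod num q = 0) then
    if PySem.Int.mod num p = 0 then 1
    else if PySem.Int.mod num q = 0 then 1
    else 0
  else 0

theorem loopA_snoc (p q : Int) (xs : List Int) (x : Int) :
    loopA p q (xs ++ [x]) = loopA p q xs + incA p q x := by
  unfold loopA incA
  rw [List.foldl_append]
  simp only [List.foldl_cons, List.foldl_nil]
  split_ifs <;> ring

-- the unguarded closed form of B
def formB (lb ub p q : Int) : Int :=
  let count : Int → Int := fun d =>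
    let d' : Int := (d.natAbs : Int)
    PySem.Int.floordiv ub d' - PySem.Int.floordiv (lb - 1) d'
  let l : Int := PySem.Int.floordiv ((p.natAbs : Int) * (q.natAbs : Int))
                   ((pyGcd p.natAbs q.natAbs : Nat) : Int)
  count p + count q - 2 * count l

theorem alt_eq_formB (lb ub p q : Int) (h : lb ≤ ub) :
    num_divisible_alt lb ub p q = formB lb ub p q := by
  simp [num_divisible_alt, formB, not_lt.mpr h]

theorem formB_base (lb p q : Int) : formB lb (lb - 1) p q = 0 := by
  simp [formB]

-- one step of floor-division counting: D ∣ x contributes 1 at x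
theorem ediv_step (D x : Int) (hD : 0 < D) :
    x / D - (x - 1) / D = if D ∣ x then 1 else 0 := by
  by_cases hdvd : D ∣ x
  · obtain ⟨k, hk⟩ := hdvd
    have h1 : D * k / D = k := Int.mul_ediv_cancel_left k (by omega)
    have h2 : (D * k - 1) / D = k - 1 := by
      have he : D * k - 1 = (D - 1) + D * (k - 1) := by ring
      rw [he, Int.add_mul_ediv_left _ _ (by omega : D ≠ 0),
        Int.ediv_eq_zero_of_lt (by omega) (by omega)]
      ring
    subst hk
    rw [h1, h2, if_pos ⟨k, rfl⟩]
    omega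
  · have hr0 : 0 ≤ x % D := Int.emod_nonneg x (by omega)
    have hrD : x % D < D := Int.emod_lt_of_pos x hD
    have hrne : x % D ≠ 0 := fun h => hdvd (Int.dvd_of_emod_eq_zero h)
    have hx : x = x % D + D * (x / D) := by
      have := Int.emod_add_mul_ediv x D; omega
    have h2 : (x - 1) / D = x / D := by
      have hx1 : x - 1 = (x % D - 1) + D * (x / D) := by omega
      rw [hx1, Int.add_mul_ediv_left _ _ (by omega : D ≠ 0),
        Int.ediv_eq_zero_of_lt (by omega) (by omega)]
      ring
    rw [h2, if_neg hdvd]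
    ring

theorem fdiv_step (d x : Int) (hd : d ≠ 0) :
    PySem.Int.floordiv x (d.natAbs : Int) - PySem.Int.floordiv (x - 1) (d.natAbs : Int)
      = if d ∣ x then 1 else 0 := by
  have hD : (0 : Int) < (d.natAbs : Int) := by
    have : d.natAbs ≠ 0 := Int.natAbs_ne_zero.mpr hd
    omega
  rw [PySem.Int.floordiv_eq_ediv_of_pos hD, PySem.Int.floordiv_eq_ediv_of_pos hD,
    ediv_step _ _ hD]
  congr 1
  simp

-- the l computed by B is (Nat.lcm p.natAbs q.natAbs : Int)
theorem formB_l_eq (p q : Int) :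
    PySem.Int.floordiv ((p.natAbs : Int) * (q.natAbs : Int)) ((pyGcd p.natAbs q.natAbs : Nat) : Int)
      = (Nat.lcm p.natAbs q.natAbs : Int) := by
  rw [pyGcd_eq, ← Int.natCast_mul, PySem.Int.floordiv_natCast]
  rw [Nat.gcd_comm]
  rfl

theorem lcm_dvd_iff_int (p q x : Int) :
    ((Nat.lcm p.natAbs q.natAbs : Int) ∣ x) ↔ (p ∣ x ∧ q ∣ x) := by
  have h : (Nat.lcm p.natAbs q.natAbs : Int) = (Int.lcm p q : Int) := rfl
  rw [h, Int.coe_lcm, lcm_dvd_iff]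

theorem incA_eq (p q num : Int) :
    incA p q num =
      (if p ∣ num then 1 else 0) + (if q ∣ num then 1 else 0)
        - 2 * (if p ∣ num ∧ q ∣ num then 1 else 0) := by
  simp only [incA, PySem.Int.mod_eq_zero_iff_dvd]
  by_cases h1 : p ∣ num <;> by_cases h2 : q ∣ num <;> simp [h1, h2]

theorem formB_step (lb ub p q : Int) (hp : p ≠ 0) (hq : q ≠ 0) :
    formB lb ub p q = formB lb (ub - 1) p q + incA p q ub := by
  have hl : ((Nat.lcm p.natAbs q.natAbs : Int)) ≠ 0 := by
    have h1 : p.natAbs ≠ 0 := Int.natAbs_ne_zero.mpr hp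
    have h2 : q.natAbs ≠ 0 := Int.natAbs_ne_zero.mpr hq
    have := Nat.lcm_ne_zero h1 h2
    omega
  simp only [formB, formB_l_eq, Int.natAbs_natCast]
  rw [incA_eq p q ub]
  have sp := fdiv_step p ub hp
  have sq := fdiv_step q ub hq
  have sl := fdiv_step _ ub hl
  rw [Int.natAbs_natCast] at sl
  simp only [lcm_dvd_iff_int] at sl
  split_ifs at sp sq sl ⊢ <;> omega

theorem main_eq (p q : Int) (hp : p ≠ 0) (hq : q ≠ 0) (lb : Int) :
    ∀ (n : Nat) (ub : Int), (ub + 1 - lb).toNat = n →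
      num_divisible lb ub p q = num_divisible_alt lb ub p q := by
  intro n
  induction n with
  | zero =>
    intro ub hn
    have h : ub < lb := by omega
    simp [num_divisible, loopA, num_divisible_alt,
      PySem.List.pyRange_one_eq_nil (by omega : ub + 1 ≤ lb), h]
  | succ n ih =>
    intro ub hn
    have h : lb ≤ ub := by omega
    have hprev : num_divisible lb (ub - 1) p q = num_divisible_alt lb (ub - 1) p q :=
      ih (ub - 1) (by omega)
    have hprevF : num_divisible lb (ub - 1) p q = formB lb (ub - 1) p q := by
      rw [hprev]
      by_cases h2 : lb ≤ ub - 1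
      · exact alt_eq_formB _ _ _ _ h2
      · have he : ub = lb := by omega
        subst he
        rw [formB_base]
        simp [num_divisible_alt]
    have hA : num_divisible lb (ub - 1) p q = loopA p q (PySem.List.pyRange lb ub 1) := by
      unfold num_divisible
      norm_num
    rw [alt_eq_formB _ _ _ _ h, formB_step lb ub p q hp hq, ← hprevF, hA]
    unfold num_divisible
    rw [PySem.List.pyRange_one_succ_right (by omega : lb ≤ ub), loopA_snoc]

-- ===== VERDICT (by name: the statement is the Claim_ definition above) =====
theorem num_divisible_spec : Claim_equal_num_divisible := by
  intro lb ub p q _hdom hpre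
  unfold Spec_num_divisible
  by_cases h : lb ≤ ub
  · obtain ⟨hp, hq⟩ := hpre h
    exact main_eq p q hp hq lb (ub + 1 - lb).toNat ub rfl
  · have hlt : ub < lb := by omega
    simp [num_divisible, loopA, num_divisible_alt,
      PySem.List.pyRange_one_eq_nil (by omega : ub + 1 ≤ lb), hlt]
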